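-- pv_equiv track=rewrite | github.com/ertamaki/sql-normalizer | src/exasol_sql_normalizer/handlers/regexp_like.py | _extract_trailing_identifier
-- ===== SOURCE A (Python) =====
-- def _extract_trailing_identifier(s: str) -> str:
--     """Extract the last identifier (column name or qualified name) from a string.
--
--     Returns empty string if the string doesn't end with an identifier.
--     Handles: col, t.col, schema.t.col, "QuotedCol", t."QuotedCol"
--     """
--     if not s:
--         return ""
--
--     i = len(s) - 1
--
--     # Handle quoted identifier
--     if s[i] == '"':
--         j = i - 1
--         while j >= 0 and s[j] != '"':
--             j -= 1
--         if j < 0: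
--             return ""
--         start = j
--         # Check for qualifier: t."col"
--         if start > 0 and s[start - 1] == ".":
--             k = start - 2
--             while k >= 0 and (s[k].isalnum() or s[k] in ("_", ".")):
--                 k -= 1
--             return s[k + 1:]
--         return s[start:]
--
--     # Unquoted: walk back through alnum, underscore, dot
--     if not (s[i].isalnum() or s[i] == "_"):
--         return ""
--
--     while i >= 0 and (s[i].isalnum() or s[i] in ("_", ".")):
--         i -= 1
--
--     return s[i + 1:]
-- ===== SOURCE B (Python) =====
-- def _is_ident_char(c):
--     return c.isalnum() or c == "_" or c == "."
--
--
-- def _matches(t):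
--     """Full match: [qualifier ending in '.'] '"' body '"'   |   identifier-run ending in a word char."""
--     if not t:
--         return False
--     if t[-1] == '"':
--         pre, quote, rest = t.partition('"')
--         return (quote == '"' and rest != "" and '"' not in rest[:-1]
--                 and (pre == "" or (all(_is_ident_char(c) for c in pre) and pre[-1] == ".")))
--     return (t[-1].isalnum() or t[-1] == "_") and all(_is_ident_char(c) for c in t)
--
--
-- def _extract_trailing_identifier(s: str) -> str:
--     for i in range(len(s)):
--         if _matches(s[i:]):
--             return s[i:]
--     return ""
-- ===== Notes on version B (the rewrite author's own statement) =====
-- stated objective: alternative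
-- what changed: Replaces A's backward index-walking case analysis by a declarative full-match predicate for a trailing identifier (quoted form split at the first quote via str.partition, or an unquoted ident-char run ending in a word char), tested against successively shorter suffixes, returning the longest matching suffix.
import Mathlib
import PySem

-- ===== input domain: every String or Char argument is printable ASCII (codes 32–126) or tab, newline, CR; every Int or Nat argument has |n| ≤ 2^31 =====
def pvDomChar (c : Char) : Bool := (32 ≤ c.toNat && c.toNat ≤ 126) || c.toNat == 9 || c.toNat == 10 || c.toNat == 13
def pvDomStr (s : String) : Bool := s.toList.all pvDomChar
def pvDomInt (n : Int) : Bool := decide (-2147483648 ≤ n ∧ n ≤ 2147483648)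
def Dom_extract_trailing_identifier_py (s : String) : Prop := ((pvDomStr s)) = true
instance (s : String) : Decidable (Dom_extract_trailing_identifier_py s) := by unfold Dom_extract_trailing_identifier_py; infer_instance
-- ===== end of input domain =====

-- B replaces A's backward index-walk by testing a declarative trailing-identifier match
-- against successively shorter suffixes (longest match wins): an alternative, not faster.


-- ===== PORT A =====
-- `s[k].isalnum() or s[k] in ("_", ".")`
def aIdentChar (c : Char) : Bool := PySem.Chars.isalnum c || c == '_' || c == '.'

-- A's two backward `while` loops share one shape: walk j down while `j >= 0 and p(s[j])`.
def aScan (p : Char → Bool) (cs : List Char) (j : Int) : Int :=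
  if h : 0 ≤ j ∧ p (PySem.List.pyGetD cs j ' ') = true then aScan p cs (j - 1) else j
  termination_by (j + 1).toNat
  decreasing_by omega

def aCore (cs : List Char) : List Char :=
  if cs = [] then []
  else
    let i : Int := PySem.List.len cs - 1
    if PySem.List.pyGetD cs i ' ' = '"' then
      let j := aScan (fun c => !(c == '"')) cs (i - 1)
      if j < 0 then []
      else
        if 0 < j ∧ PySem.List.pyGetD cs (j - 1) ' ' = '.' then
          let k := aScan aIdentChar cs (j - 2)
          PySem.List.slice cs (some (k + 1)) none
        else PySem.List.slice cs (some j) none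
    else
      if !(PySem.Chars.isalnum (PySem.List.pyGetD cs i ' ') || PySem.List.pyGetD cs i ' ' == '_') then []
      else
        let i2 := aScan aIdentChar cs i
        PySem.List.slice cs (some (i2 + 1)) none

def extract_trailing_identifier_py (s : String) : String := String.ofList (aCore s.toList)

-- ===== PORT B =====
-- Source B's `_is_ident_char`
def bIdentChar (c : Char) : Bool := PySem.Chars.isalnum c || c == '_' || c == '.'
-- `t[-1].isalnum() or t[-1] == "_"`
def bWordChar (c : Char) : Bool := PySem.Chars.isalnum c || c == '_'

-- hand port of `t.partition('"')` (PySem has no partition): split at the FIRST '"',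
-- or (t, "", "") when there is none — exact for this fixed one-character separator.
def bPartitionQuote : List Char → List Char × List Char × List Char
  | [] => ([], [], [])
  | c :: r =>
      if c = '"' then ([], ['"'], r)
      else
        let p := bPartitionQuote r
        (c :: p.1, p.2.1, p.2.2)

-- Source B's `_matches`
def bMatches (t : List Char) : Bool :=
  if t = [] then false
  else if PySem.List.pyGetD t (-1) ' ' = '"' then
    let p := bPartitionQuote t
    p.2.1 == ['"'] && !(p.2.2 == []) &&
      !(PySem.Chars.isIn ['"'] (PySem.List.slice p.2.2 none (some (-1)))) &&
      (p.1 == [] || (p.1.all bIdentChar && PySem.List.pyGetD p.1 (-1) ' ' == '.'))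
  else bWordChar (PySem.List.pyGetD t (-1) ' ') && t.all bIdentChar

-- `for i in range(len(s)): if _matches(s[i:]): return s[i:]` over the suffixes
def bFindLoop : List Char → List Char
  | [] => []
  | c :: r => if bMatches (c :: r) then c :: r else bFindLoop r

def extract_trailing_identifier_py_alt (s : String) : String := String.ofList (bFindLoop s.toList)

-- ===== PRECONDITION & SPEC =====
def Spec_extract_trailing_identifier_py (s : String) (out : String) : Prop := out = extract_trailing_identifier_py_alt s
instance (s : String) (out : String) : Decidable (Spec_extract_trailing_identifier_py s out) := by unfold Spec_extract_trailing_identifier_py; infer_instance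

-- ===== CLAIM (what is proved, stated in full; the proofs are below) =====
def Claim_equal_extract_trailing_identifier_py : Prop := ∀ (s : String), Dom_extract_trailing_identifier_py s → Spec_extract_trailing_identifier_py s (extract_trailing_identifier_py s)

-- ===== LEMMAS AND PROOFS =====

-- declarative match forms (proof-side only)
def MQ (t : List Char) : Prop :=
  ∃ pre body : List Char, t = pre ++ '"' :: body ++ ['"'] ∧ '"' ∉ pre ∧ '"' ∉ body ∧
    (pre = [] ∨ (pre.all bIdentChar = true ∧ pre.getLast? = some '.'))

def MU (t : List Char) : Prop :=
  t ≠ [] ∧ t.all bIdentChar = true ∧ ∃ c, t.getLast? = some c ∧ bWordChar c = true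

theorem aIdent_eq_bIdent : aIdentChar = bIdentChar := rfl

theorem word_ident {c : Char} (h : bWordChar c = true) : bIdentChar c = true := by
  simp only [bWordChar, Bool.or_eq_true] at h
  simp only [bIdentChar, Bool.or_eq_true]
  tauto

theorem ident_no_quote {l : List Char} (h : l.all bIdentChar = true) : '"' ∉ l := by
  intro hm
  have := List.all_eq_true.mp h _ hm
  exact absurd this (by decide)

theorem pyGetD_at {cs : List Char} {n : Nat} (h : n < cs.length) (d : Char) :
    PySem.List.pyGetD cs (n : Int) d = cs[n] := by
  rw [PySem.List.pyGetD_natCast]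
  exact List.getD_eq_getElem cs d h

theorem pyGetD_last {cs : List Char} (h : cs ≠ []) :
    PySem.List.pyGetD cs (PySem.List.len cs - 1) ' ' = cs.getLast h := by
  have h1 : 0 < cs.length := List.length_pos_of_ne_nil h
  rw [PySem.List.len_eq, show (cs.length : Int) - 1 = ((cs.length - 1 : Nat) : Int) by omega,
      pyGetD_at (by omega), List.getLast_eq_getElem]

theorem aScan_spec (p : Char → Bool) (cs : List Char) (m : Nat) (hm : m ≤ cs.length) :
    ∃ u w : List Char, cs.take m = u ++ w ∧ w.all p = true ∧
      (u = [] ∨ ∃ d, u.getLast? = some d ∧ p d = false) ∧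
      aScan p cs ((m : Int) - 1) = (u.length : Int) - 1 := by
  induction m with
  | zero =>
      refine ⟨[], [], by simp, by simp, Or.inl rfl, ?_⟩
      rw [aScan]
      simp
  | succ n ih =>
      have hn : n < cs.length := by omega
      have hidx : ((n + 1 : Nat) : Int) - 1 = (n : Int) := by push_cast; ring
      have htk : cs.take (n + 1) = cs.take n ++ [cs[n]] := by
        rw [List.take_add_one, List.getElem?_eq_getElem hn]
        rfl
      by_cases hp : p cs[n] = true
      · obtain ⟨u, w, h1, h2, h3, h4⟩ := ih (by omega)
        refine ⟨u, w ++ [cs[n]], ?_, ?_, h3, ?_⟩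
        · rw [htk, h1, List.append_assoc]
        · simp [List.all_append, h2, hp]
        · rw [hidx, aScan, dif_pos ⟨by positivity, by rw [pyGetD_at hn]; exact hp⟩]
          exact h4
      · refine ⟨cs.take (n + 1), [], by simp, by simp, ?_, ?_⟩
        · refine Or.inr ⟨cs[n], ?_, by simpa using hp⟩
          rw [htk]
          exact List.getLast?_concat
        · rw [hidx, aScan, dif_neg (by rw [pyGetD_at hn]; tauto)]
          have : (cs.take (n + 1)).length = n + 1 := by
            rw [List.length_take]; omega
          rw [this]; push_cast; ring

theorem bPartition_first (a d : List Char) (ha : '"' ∉ a) :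
    bPartitionQuote (a ++ '"' :: d) = (a, ['"'], d) := by
  induction a with
  | nil => simp [bPartitionQuote]
  | cons c r ih =>
      simp only [List.mem_cons, not_or] at ha
      rw [List.cons_append, bPartitionQuote, if_neg (fun hh => ha.1 hh.symm), ih ha.2]

theorem exists_first_quote {t : List Char} (h : '"' ∈ t) :
    ∃ a d, t = a ++ '"' :: d ∧ '"' ∉ a := by
  induction t with
  | nil => cases h
  | cons c r ih =>
      by_cases hc : c = '"'
      · exact ⟨[], r, by rw [hc]; rfl, by simp⟩
      · have hr : '"' ∈ r := by
          rcases List.mem_cons.mp h with h' | h'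
          · exact absurd h'.symm hc
          · exact h'
        obtain ⟨a, d, h1, h2⟩ := ih hr
        exact ⟨c :: a, d, by rw [List.cons_append, h1],
          by simp only [List.mem_cons, not_or]; exact ⟨fun hh => hc hh.symm, h2⟩⟩

theorem first_quote_unique : ∀ {a₁ d₁ a₂ d₂ : List Char},
    a₁ ++ '"' :: d₁ = a₂ ++ '"' :: d₂ → '"' ∉ a₁ → '"' ∉ a₂ → a₁ = a₂ ∧ d₁ = d₂ := by
  intro a₁
  induction a₁ with
  | nil =>
      intro d₁ a₂ d₂ h h1 h2
      cases a₂ with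
      | nil => simpa using h
      | cons b r =>
          simp only [List.nil_append, List.cons_append, List.cons.injEq] at h
          exact absurd (by rw [h.1]; exact List.mem_cons_self) h2
  | cons b r ih =>
      intro d₁ a₂ d₂ h h1 h2
      cases a₂ with
      | nil =>
          simp only [List.nil_append, List.cons_append, List.cons.injEq] at h
          exact absurd (by rw [← h.1]; exact List.mem_cons_self) h1
      | cons b' r' =>
          simp only [List.cons_append, List.cons.injEq] at h
          simp only [List.mem_cons, not_or] at h1 h2
          obtain ⟨h3, h4⟩ := ih h.2 h1.2 h2.2
          exact ⟨by rw [h.1, h3], h4⟩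

theorem suffix_getLast? {t cs : List Char} (h : t <:+ cs) (ht : t ≠ []) :
    cs.getLast? = t.getLast? := by
  obtain ⟨pfx, rfl⟩ := h
  exact List.getLast?_append_of_ne_nil pfx ht

theorem longer_suffix_split {u t t₂ : List Char} (h₂ : t₂ <:+ u ++ t) (hl : t.length < t₂.length) :
    ∃ v, t₂ = v ++ t ∧ v ≠ [] ∧ v <:+ u := by
  have hts : t <:+ t₂ := List.suffix_of_suffix_length_le (List.suffix_append u t) h₂ (le_of_lt hl)
  obtain ⟨v, rfl⟩ := hts
  refine ⟨v, rfl, ?_, ?_⟩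
  · intro hv
    rw [hv] at hl
    simp at hl
  · obtain ⟨pfx, hp⟩ := h₂
    rw [← List.append_assoc] at hp
    exact ⟨pfx, List.append_cancel_right hp⟩

theorem MQ_getLast {t : List Char} (h : MQ t) : t.getLast? = some '"' := by
  obtain ⟨pre, body, rfl, -, -, -⟩ := h
  rw [show pre ++ '"' :: body ++ ['"'] = (pre ++ '"' :: body) ++ ['"'] by simp]
  exact List.getLast?_concat

theorem MQ_two_quotes {t : List Char} (h : MQ t) : 2 ≤ t.count '"' := by
  obtain ⟨pre, body, rfl, -, -, -⟩ := h
  simp only [List.count_append, List.count_cons, List.count_nil, beq_self_eq_true, if_true]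
  omega

theorem MU_not_of_last_quote {t : List Char} (h : t.getLast? = some '"') : ¬ MU t := by
  rintro ⟨ht, -, c, hc, hw⟩
  rw [h, Option.some.injEq] at hc
  rw [← hc] at hw
  exact absurd hw (by decide)

theorem bMatches_iff (t : List Char) : bMatches t = true ↔ MQ t ∨ MU t := by
  by_cases ht : t = []
  · subst ht
    constructor
    · intro h
      rw [bMatches] at h
      simp at h
    · rintro (h | h)
      · have := MQ_getLast h
        simp at this
      · exact absurd rfl h.1
  · have hlast : t.getLast? = some (t.getLast ht) := List.getLast?_eq_some_getLast ht
    rw [bMatches, if_neg ht, PySem.List.pyGetD_neg_one t ' ' ht]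
    by_cases hq : t.getLast ht = '"'
    · rw [if_pos hq]
      have ht2 : t = t.dropLast ++ ['"'] := by
        conv_lhs => rw [← List.dropLast_concat_getLast ht]
        rw [hq]
      have hMU : ¬ MU t := MU_not_of_last_quote (by rw [hlast, hq])
      by_cases hys : '"' ∈ t.dropLast
      · obtain ⟨a, d, hyd, hna⟩ := exists_first_quote hys
        have ht3 : t = a ++ '"' :: (d ++ ['"']) := by
          rw [ht2, hyd]
          simp
        rw [show bPartitionQuote t = (a, ['"'], d ++ ['"']) by rw [ht3]; exact bPartition_first a _ hna]
        simp only [Bool.and_eq_true, Bool.or_eq_true, beq_self_eq_true, true_and,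
          Bool.not_eq_eq_eq_not, Bool.not_true, beq_eq_false_iff_ne, ne_eq,
          PySem.List.slice_to_neg_one, List.dropLast_concat, beq_iff_eq]
        constructor
        · rintro ⟨⟨-, hnd⟩, hcond⟩
          left
          have hnd' : '"' ∉ d := by
            rw [PySem.Chars.isIn_eq_false_iff] at hnd
            intro hm
            exact hnd ((List.singleton_infix_iff _ _).mpr hm)
          refine ⟨a, d, by rw [ht3]; simp, hna, hnd', ?_⟩
          rcases hcond with h | ⟨h1, h2⟩
          · exact Or.inl h
          · right
            refine ⟨h1, ?_⟩
            have hane : a ≠ [] := by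
              intro h0
              rw [h0] at h2
              exact absurd h2 (by decide)
            rw [List.getLast?_eq_some_getLast hane, ← PySem.List.pyGetD_neg_one a ' ' hane, h2]
        · rintro (⟨pre, body, hEq, hp, hb, hcond⟩ | hmu)
          · rw [ht3] at hEq
            have hEq' : a ++ '"' :: (d ++ ['"']) = pre ++ '"' :: (body ++ ['"']) := by
              rw [hEq]
              simp
            obtain ⟨rfl, htail⟩ := first_quote_unique hEq' hna hp
            obtain rfl : d = body := List.append_cancel_right htail
            refine ⟨⟨by simp, by
              rw [PySem.Chars.isIn_eq_false_iff]
              intro hin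
              exact hb ((List.singleton_infix_iff _ _).mp hin)⟩, ?_⟩
            rcases hcond with h | ⟨h1, h2⟩
            · exact Or.inl h
            · right
              have hane : a ≠ [] := by
                intro h0
                rw [h0] at h2
                simp at h2
              refine ⟨h1, ?_⟩
              rw [PySem.List.pyGetD_neg_one a ' ' hane, ← Option.some.injEq,
                  ← List.getLast?_eq_some_getLast hane, h2]
          · exact absurd hmu hMU
      · rw [show bPartitionQuote t = (t.dropLast, ['"'], []) by
            conv_lhs => rw [ht2]
            exact bPartition_first _ [] hys]
        simp only [Bool.and_eq_true, beq_self_eq_true, true_and]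
        constructor
        · rintro ⟨⟨h0, -⟩, -⟩
          simp at h0
        · rintro (hmq | hmu)
          · have h2 := MQ_two_quotes hmq
            have h1 : t.count '"' = 1 := by
              rw [ht2]
              simp [List.count_append, List.count_eq_zero.mpr hys]
            omega
          · exact absurd hmu hMU
    · rw [if_neg hq]
      constructor
      · intro h
        simp only [Bool.and_eq_true] at h
        exact Or.inr ⟨ht, h.2, t.getLast ht, hlast, h.1⟩
      · rintro (hmq | ⟨-, hall, c, hc, hw⟩)
        · have := MQ_getLast hmq
          rw [hlast, Option.some.injEq] at this
          exact absurd this hq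
        · rw [hlast, Option.some.injEq] at hc
          simp only [Bool.and_eq_true]
          exact ⟨by rw [← hc] at hw; exact hw, hall⟩

theorem bMatches_eq_false (t : List Char) (h1 : ¬ MQ t) (h2 : ¬ MU t) : bMatches t = false := by
  rw [← Bool.not_eq_true, bMatches_iff]
  tauto

theorem bFindLoop_eq_of {cs t : List Char} (ht : t <:+ cs) (hm : bMatches t = true)
    (hmax : ∀ u, u <:+ cs → t.length < u.length → bMatches u = false) : bFindLoop cs = t := by
  induction cs with
  | nil =>
      obtain rfl := List.suffix_nil.mp ht
      rfl
  | cons c r ih =>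
      rw [bFindLoop]
      by_cases he : t = c :: r
      · rw [← he, hm]
        simp [he]
      · have htr : t <:+ r := by
          rcases List.suffix_cons_iff.mp ht with h' | h'
          · exact absurd h' he
          · exact h'
        have : bMatches (c :: r) = false := by
          refine hmax (c :: r) List.suffix_rfl ?_
          have := htr.length_le
          simp only [List.length_cons]
          omega
        rw [this]
        simp only [Bool.false_eq_true, if_false]
        exact ih htr fun u hu hlu => hmax u (hu.trans (List.suffix_cons c r)) hlu

theorem bFindLoop_eq_nil {cs : List Char} (h : ∀ t, t <:+ cs → bMatches t = false) :
    bFindLoop cs = [] := by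
  induction cs with
  | nil => rfl
  | cons c r ih =>
      rw [bFindLoop, h (c :: r) List.suffix_rfl]
      simp only [Bool.false_eq_true, if_false]
      exact ih fun t htr => h t (htr.trans (List.suffix_cons c r))

theorem quote_shape_getLast {v w : List Char} :
    (v ++ ('"' :: (w ++ ['"']))).getLast? = some '"' := by
  rw [show v ++ ('"' :: (w ++ ['"'])) = (v ++ ('"' :: w)) ++ ['"'] by simp]
  exact List.getLast?_concat

theorem count_two_absurd {v₂ w body rest : List Char}
    (htail : v₂ ++ rest = body ++ ['"']) (hb : '"' ∉ body)
    (hrest : rest = '"' :: (w ++ ['"']) ∨ ∃ w', rest = w' ++ ('.' :: ('"' :: (w ++ ['"'])))) :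
    False := by
  have hc := congrArg (List.count '"') htail
  have h2 : 2 ≤ rest.count '"' := by
    rcases hrest with rfl | ⟨w', rfl⟩ <;>
      simp only [List.count_append, List.count_cons, List.count_nil, beq_self_eq_true,
        if_true] <;> omega
  simp only [List.count_append, List.count_eq_zero.mpr hb, List.count_cons, List.count_nil,
    beq_self_eq_true, if_true] at hc
  omega

theorem bFind_quoted_noqual (a w : List Char) (hwq : '"' ∉ w) (hna : a.getLast? ≠ some '.') :
    bFindLoop (a ++ ('"' :: (w ++ ['"']))) = '"' :: (w ++ ['"']) := by
  apply bFindLoop_eq_of ⟨a, rfl⟩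
  · rw [bMatches_iff]
    exact Or.inl ⟨[], w, by simp, by simp, hwq, Or.inl rfl⟩
  · intro t₂ ht₂ hlt
    obtain ⟨v, rfl, hvne, hvsuf⟩ := longer_suffix_split ht₂ hlt
    apply bMatches_eq_false
    · rintro ⟨pre, body, hEq, hp, hb, hcond⟩
      by_cases hvq : '"' ∈ v
      · obtain ⟨v₁, v₂, rfl, hv1⟩ := exists_first_quote hvq
        have hEq2 : v₁ ++ '"' :: (v₂ ++ ('"' :: (w ++ ['"']))) = pre ++ '"' :: (body ++ ['"']) := by simpa using hEq
        obtain ⟨-, htail⟩ := first_quote_unique hEq2 hv1 hp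
        exact count_two_absurd htail hb (Or.inl rfl)
      · have hEq2 : v ++ '"' :: (w ++ ['"']) = pre ++ '"' :: (body ++ ['"']) := by simpa using hEq
        obtain ⟨hpre, -⟩ := first_quote_unique hEq2 hvq hp
        rcases hcond with h | ⟨-, hlast⟩
        · exact hvne (by rw [hpre, h])
        · rw [← hpre] at hlast
          rw [← suffix_getLast? hvsuf hvne] at hlast
          exact hna hlast
    · exact fun hmu => MU_not_of_last_quote quote_shape_getLast hmu

theorem bFind_quoted_qual (u' w' w : List Char) (hw' : w'.all bIdentChar = true) (hwq : '"' ∉ w)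
    (hu' : u' = [] ∨ ∃ e, u'.getLast? = some e ∧ bIdentChar e = false) :
    bFindLoop (u' ++ (w' ++ ('.' :: ('"' :: (w ++ ['"']))))) =
      w' ++ ('.' :: ('"' :: (w ++ ['"']))) := by
  have hw'q : '"' ∉ w' := ident_no_quote hw'
  apply bFindLoop_eq_of ⟨u', rfl⟩
  · rw [bMatches_iff]
    refine Or.inl ⟨w' ++ ['.'], w, by simp, ?_, hwq,
      Or.inr ⟨by rw [List.all_append, hw']; decide, List.getLast?_concat⟩⟩
    simp only [List.mem_append, List.mem_singleton, not_or]
    exact ⟨hw'q, by decide⟩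
  · intro t₂ ht₂ hlt
    obtain ⟨v, rfl, hvne, hvsuf⟩ := longer_suffix_split ht₂ hlt
    rcases hu' with rfl | ⟨e, hel, hep⟩
    · exact absurd (List.suffix_nil.mp hvsuf) hvne
    · have hvlast : v.getLast? = some e := by rw [← suffix_getLast? hvsuf hvne, hel]
      have hev : e ∈ v := List.mem_of_getLast? hvlast
      apply bMatches_eq_false
      · rintro ⟨pre, body, hEq, hp, hb, hcond⟩
        by_cases hvq : '"' ∈ v
        · obtain ⟨v₁, v₂, rfl, hv1⟩ := exists_first_quote hvq
          have hEq2 : v₁ ++ '"' :: (v₂ ++ (w' ++ ('.' :: ('"' :: (w ++ ['"']))))) =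
              pre ++ '"' :: (body ++ ['"']) := by simpa using hEq
          obtain ⟨-, htail⟩ := first_quote_unique hEq2 hv1 hp
          exact count_two_absurd htail hb (Or.inr ⟨w', rfl⟩)
        · have hnoq : '"' ∉ v ++ (w' ++ ['.']) := by
            simp only [List.mem_append, List.mem_singleton, not_or]
            exact ⟨hvq, hw'q, by decide⟩
          have hEq2 : (v ++ (w' ++ ['.'])) ++ '"' :: (w ++ ['"']) =
              pre ++ '"' :: (body ++ ['"']) := by simpa using hEq
          obtain ⟨hpre, -⟩ := first_quote_unique hEq2 hnoq hp
          rcases hcond with h | ⟨hall, -⟩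
          · rw [← hpre] at h
            simp at h
          · rw [← hpre] at hall
            have := List.all_eq_true.mp hall e (by simp [hev])
            rw [hep] at this
            cases this
      · exact fun hmu => MU_not_of_last_quote (by
          rw [show v ++ (w' ++ ('.' :: ('"' :: (w ++ ['"'])))) =
            (v ++ w' ++ ('.' :: ('"' :: w))) ++ ['"'] by simp]
          exact List.getLast?_concat) hmu

theorem bFind_noquote (ys : List Char) (h : '"' ∉ ys) : bFindLoop (ys ++ ['"']) = [] := by
  apply bFindLoop_eq_nil
  intro t htsuf
  apply bMatches_eq_false
  · intro hmq
    have h2q := MQ_two_quotes hmq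
    have hcnt : t.count '"' ≤ (ys ++ ['"']).count '"' :=
      List.Sublist.count_le '"' htsuf.sublist
    have h1 : (ys ++ ['"']).count '"' = 1 := by
      simp [List.count_append, List.count_eq_zero.mpr h]
    omega
  · rintro ⟨htne, -, c, hc, hwc⟩
    have := suffix_getLast? htsuf htne
    rw [List.getLast?_concat, hc, Option.some.injEq] at this
    rw [← this] at hwc
    exact absurd hwc (by decide)

theorem bFind_nonword (cs : List Char) (hlq : cs.getLast? ≠ some '"')
    (hlw : ∀ c, cs.getLast? = some c → bWordChar c = false) : bFindLoop cs = [] := by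
  apply bFindLoop_eq_nil
  intro t htsuf
  by_cases htne : t = []
  · rw [htne, ← Bool.not_eq_true, bMatches_iff]
    rintro (hmq | hmu)
    · have := MQ_getLast hmq
      simp at this
    · exact absurd rfl hmu.1
  · apply bMatches_eq_false
    · intro hmq
      have := MQ_getLast hmq
      rw [← suffix_getLast? htsuf htne] at this
      exact hlq this
    · rintro ⟨-, -, c, hc, hwc⟩
      rw [← suffix_getLast? htsuf htne] at hc
      rw [hlw c hc] at hwc
      cases hwc

theorem bFind_unquoted (u w : List Char) (hw : w.all bIdentChar = true) (hwne : w ≠ [])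
    (hwlast : ∃ c, w.getLast? = some c ∧ bWordChar c = true)
    (hu : u = [] ∨ ∃ e, u.getLast? = some e ∧ bIdentChar e = false) :
    bFindLoop (u ++ w) = w := by
  obtain ⟨c, hcl, hcw⟩ := hwlast
  apply bFindLoop_eq_of ⟨u, rfl⟩
  · rw [bMatches_iff]
    exact Or.inr ⟨hwne, hw, c, hcl, hcw⟩
  · intro t₂ ht₂ hlt
    obtain ⟨v, rfl, hvne, hvsuf⟩ := longer_suffix_split ht₂ hlt
    rcases hu with rfl | ⟨e, hel, hep⟩
    · exact absurd (List.suffix_nil.mp hvsuf) hvne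
    · have hvlast : v.getLast? = some e := by rw [← suffix_getLast? hvsuf hvne, hel]
      have hev : e ∈ v := List.mem_of_getLast? hvlast
      apply bMatches_eq_false
      · intro hmq
        have h1 := MQ_getLast hmq
        rw [List.getLast?_append_of_ne_nil v hwne, hcl, Option.some.injEq] at h1
        rw [h1] at hcw
        exact absurd hcw (by decide)
      · rintro ⟨-, hall, -⟩
        have := List.all_eq_true.mp hall e (by simp [hev])
        rw [hep] at this
        cases this

theorem pyGetD_append_getLast {a : List Char} (rest : List Char) (ha : a ≠ []) :
    PySem.List.pyGetD (a ++ rest) ((a.length : Int) - 1) ' ' = a.getLast ha := by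
  have h1 : 0 < a.length := List.length_pos_of_ne_nil ha
  rw [show ((a.length : Int) - 1) = ((a.length - 1 : Nat) : Int) by omega,
      pyGetD_at (by simp only [List.length_append]; omega)]
  rw [List.getElem_append_left (by omega)]
  exact (List.getLast_eq_getElem ha).symm

theorem main_lists (cs : List Char) : aCore cs = bFindLoop cs := by
  by_cases hnil : cs = []
  · rw [hnil]
    rfl
  · have hlen : 0 < cs.length := List.length_pos_of_ne_nil hnil
    simp only [aCore, if_neg hnil, pyGetD_last hnil]
    by_cases hq : cs.getLast hnil = '"'
    · rw [if_pos hq]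
      have ht2 : cs = cs.dropLast ++ ['"'] := by
        conv_lhs => rw [← List.dropLast_concat_getLast hnil]
        rw [hq]
      obtain ⟨u, w, htk, hw, hu, hres⟩ :=
        aScan_spec (fun c => !(c == '"')) cs cs.dropLast.length
          (by have := List.length_dropLast (xs := cs); omega)
      have hyw : cs.dropLast = u ++ w := by
        rw [← htk]
        conv_lhs => rw [List.dropLast_eq_take]
        rw [List.length_dropLast]
      have hwq : '"' ∉ w := by
        intro hm
        have := List.all_eq_true.mp hw _ hm
        simp at this
      have e1 : PySem.List.len cs - 1 - 1 = (cs.dropLast.length : Int) - 1 := by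
        rw [PySem.List.len_eq]
        have := List.length_dropLast (xs := cs)
        omega
      rw [e1, hres]
      by_cases hu0 : u = []
      · rw [if_pos (by simp [hu0])]
        have hnq : '"' ∉ cs.dropLast := by
          rw [hyw, hu0, List.nil_append]
          exact hwq
        conv_rhs => rw [ht2]
        exact (bFind_noquote _ hnq).symm
      · rw [if_neg (by have := List.length_pos_of_ne_nil hu0; omega)]
        rcases hu with rfl | ⟨d, hdl, hdp⟩
        · exact absurd rfl hu0
        have hd : d = '"' := by simpa using hdp
        have hgl : u.getLast hu0 = '"' := by
          have h3 := List.getLast?_eq_some_getLast hu0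
          rw [hdl, Option.some.injEq] at h3
          rw [← h3, hd]
        have hu2' : u = u.dropLast ++ ['"'] := by
          conv_lhs => rw [← List.dropLast_concat_getLast hu0]
          rw [hgl]
        obtain ⟨a, hu2⟩ : ∃ a, u = a ++ ['"'] := ⟨u.dropLast, hu2'⟩
        have hcs2 : cs = a ++ ('"' :: (w ++ ['"'])) := by
          rw [ht2, hyw, hu2]
          simp
        have e2 : (u.length : Int) - 1 = (a.length : Int) := by
          rw [hu2, List.length_append]
          push_cast
          simp
        rw [e2]
        have hcond_iff : (0 < (a.length : Int) ∧
            PySem.List.pyGetD cs ((a.length : Int) - 1) ' ' = '.') ↔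
            (a ≠ [] ∧ a.getLast? = some '.') := by
          constructor
          · rintro ⟨h1, h2⟩
            have hane : a ≠ [] := by
              intro h0
              rw [h0] at h1
              simp at h1
            refine ⟨hane, ?_⟩
            rw [hcs2, pyGetD_append_getLast _ hane] at h2
            rw [List.getLast?_eq_some_getLast hane, h2]
          · rintro ⟨hane, h2⟩
            refine ⟨by have := List.length_pos_of_ne_nil hane; omega, ?_⟩
            rw [hcs2, pyGetD_append_getLast _ hane]
            rw [List.getLast?_eq_some_getLast hane, Option.some.injEq] at h2
            exact h2
        by_cases hqc : a ≠ [] ∧ a.getLast? = some '.'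
        · rw [if_pos (hcond_iff.mpr hqc)]
          obtain ⟨hane, halast⟩ := hqc
          have hald : a.getLast hane = '.' := by
            rw [List.getLast?_eq_some_getLast hane, Option.some.injEq] at halast
            exact halast
          have ha2' : a = a.dropLast ++ ['.'] := by
            conv_lhs => rw [← List.dropLast_concat_getLast hane]
            rw [hald]
          obtain ⟨a', ha2⟩ : ∃ a', a = a' ++ ['.'] := ⟨a.dropLast, ha2'⟩
          have hcs3 : cs = a' ++ ('.' :: ('"' :: (w ++ ['"']))) := by
            rw [hcs2, ha2]
            simp
          have e3 : (a.length : Int) - 2 = (a'.length : Int) - 1 := by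
            rw [ha2, List.length_append, List.length_singleton]
            push_cast
            ring
          obtain ⟨u', w', htk', hw', hu', hres'⟩ :=
            aScan_spec aIdentChar cs a'.length
              (by rw [hcs3]; simp only [List.length_append]; omega)
          have ha'w : a' = u' ++ w' := by
            rw [← htk', hcs3, List.take_left]
          rw [e3, hres']
          have e4 : (u'.length : Int) - 1 + 1 = ((u'.length : Nat) : Int) := by ring
          rw [e4, PySem.List.slice_from cs (by positivity), Int.toNat_natCast]
          have hdrop : cs.drop u'.length = w' ++ ('.' :: ('"' :: (w ++ ['"']))) := by
            rw [hcs3, ha'w, List.append_assoc, List.drop_left]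
          rw [hdrop]
          conv_rhs => rw [hcs3, ha'w, List.append_assoc]
          exact (bFind_quoted_qual u' w' w hw' hwq hu').symm
        · rw [if_neg (fun hc => hqc (hcond_iff.mp hc))]
          rw [PySem.List.slice_from cs (by positivity), Int.toNat_natCast]
          have hdrop : cs.drop a.length = '"' :: (w ++ ['"']) := by
            rw [hcs2, List.drop_left]
          rw [hdrop]
          conv_rhs => rw [hcs2]
          refine (bFind_quoted_noqual _ w hwq ?_).symm
          intro hlast
          exact hqc ⟨by
            intro h0
            rw [h0] at hlast
            simp at hlast, hlast⟩
    · rw [if_neg hq]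
      by_cases hwc : bWordChar (cs.getLast hnil) = true
      · rw [if_neg (by
          simp [show (PySem.Chars.isalnum (cs.getLast hnil) || cs.getLast hnil == '_') = true
            from hwc])]
        obtain ⟨u, w, htk, hw, hu, hres⟩ := aScan_spec aIdentChar cs cs.length le_rfl
        have hcw : cs = u ++ w := by rw [← htk, List.take_length]
        have e5 : PySem.List.len cs - 1 = ((cs.length : Nat) : Int) - 1 := by
          rw [PySem.List.len_eq]
        rw [e5, hres]
        have e6 : (u.length : Int) - 1 + 1 = ((u.length : Nat) : Int) := by ring
        rw [e6, PySem.List.slice_from cs (by positivity), Int.toNat_natCast]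
        have hdrop : cs.drop u.length = w := by
          conv_lhs => rw [hcw]
          exact List.drop_left ..
        rw [hdrop]
        have hwne : w ≠ [] := by
          intro h0
          rw [h0, List.append_nil] at hcw
          rcases hu with rfl | ⟨e, hel, hep⟩
          · exact hnil hcw
          · rw [← hcw, List.getLast?_eq_some_getLast hnil, Option.some.injEq] at hel
            rw [← hel] at hep
            have := word_ident hwc
            rw [aIdent_eq_bIdent] at hep
            rw [hep] at this
            cases this
        have hwlast : w.getLast? = some (cs.getLast hnil) := by
          rw [← suffix_getLast? ⟨u, hcw.symm⟩ hwne, List.getLast?_eq_some_getLast hnil]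
        conv_rhs => rw [hcw]
        exact (bFind_unquoted u w hw hwne ⟨_, hwlast, hwc⟩ hu).symm
      · have hwf : bWordChar (cs.getLast hnil) = false := Bool.eq_false_iff.mpr hwc
        rw [if_pos (by
          rw [show (PySem.Chars.isalnum (cs.getLast hnil) || cs.getLast hnil == '_') =
            bWordChar (cs.getLast hnil) from rfl, hwf]
          rfl)]
        refine (bFind_nonword cs ?_ ?_).symm
        · rw [List.getLast?_eq_some_getLast hnil]
          intro hcl
          exact hq (Option.some.injEq .. |>.mp hcl)
        · intro c hc
          rw [List.getLast?_eq_some_getLast hnil, Option.some.injEq] at hc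
          rw [← hc]
          exact hwf

-- ===== VERDICT (by name: the statement is the Claim_ definition above) =====
theorem extract_trailing_identifier_py_spec : Claim_equal_extract_trailing_identifier_py := by
  intro s _
  unfold Spec_extract_trailing_identifier_py extract_trailing_identifier_py extract_trailing_identifier_py_alt
  rw [main_lists]
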